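-- pv_equiv track=rewrite | github.com/pisani-giova/Internship-System-Electronics | code/week2.py | ordina_punti_matrice
-- ===== SOURCE A (Python) =====
-- def ordina_punti_matrice(lista_pos, tolleranza_y=10):
--     """
--     Ordina una lista di punti (x, y) da sinistra a destra e dall'alto al basso.
--
--     Parametri:
--         lista_pos: lista di tuple (x, y)
--         tolleranza_y: due punti con y vicine entro questa soglia
--                       vengono considerati nella stessa riga
--
--     Ritorna:
--         lista ordinata
--     """
--     if not lista_pos:
--         return []
--
--     # 1) ordino grossolanamente per y e poi x
--     punti = sorted(lista_pos, key=lambda p: (p[1], p[0]))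
--
--     righe = []
--     riga_corrente = [punti[0]]
--
--     for p in punti[1:]:
--         # confronto la y col primo punto della riga corrente
--         if abs(p[1] - riga_corrente[0][1]) <= tolleranza_y:
--             riga_corrente.append(p)
--         else:
--             righe.append(riga_corrente)
--             riga_corrente = [p]
--
--     righe.append(riga_corrente)
--
--     # 2) ordino ogni riga da sinistra a destra
--     for i in range(len(righe)):
--         righe[i] = sorted(righe[i], key=lambda p: p[0])
--
--     # 3) appiattisco le righe in una sola lista
--     ordinati = []
--     for riga in righe:
--         ordinati.extend(riga)
--
--     return ordinati
-- ===== SOURCE B (Python) =====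
-- def ordina_punti_matrice(lista_pos, tolleranza_y=10):
--     """After the rough (y, x) sort the y's are nondecreasing, so each row is a
--     contiguous block: instead of grouping point by point into nested row lists,
--     find every row's end by binary search on y and emit the x-sorted block."""
--     punti = sorted(lista_pos, key=lambda p: (p[1], p[0]))
--     ordinati = []
--     i, n = 0, len(punti)
--     while i < n:
--         limite = punti[i][1] + tolleranza_y
--         # binary search: first index in (i, n] ... [i+1, n) with y > limite
--         lo, hi = i + 1, n
--         while lo < hi:
--             mid = (lo + hi) // 2
--             if punti[mid][1] <= limite:
--                 lo = mid + 1
--             else: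
--                 hi = mid
--         ordinati.extend(sorted(punti[i:lo], key=lambda p: p[0]))
--         i = lo
--     return ordinati
-- ===== Notes on version B (the rewrite author's own statement) =====
-- stated objective: alternative
-- what changed: A groups the (y,x)-sorted points one by one into nested row lists, re-sorts each row and flattens; B instead exploits that rows are contiguous blocks of the sorted list and locates each row's end by binary search on y, emitting x-sorted blocks directly with index arithmetic (no grouping pass, no nested lists).
import Mathlib
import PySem

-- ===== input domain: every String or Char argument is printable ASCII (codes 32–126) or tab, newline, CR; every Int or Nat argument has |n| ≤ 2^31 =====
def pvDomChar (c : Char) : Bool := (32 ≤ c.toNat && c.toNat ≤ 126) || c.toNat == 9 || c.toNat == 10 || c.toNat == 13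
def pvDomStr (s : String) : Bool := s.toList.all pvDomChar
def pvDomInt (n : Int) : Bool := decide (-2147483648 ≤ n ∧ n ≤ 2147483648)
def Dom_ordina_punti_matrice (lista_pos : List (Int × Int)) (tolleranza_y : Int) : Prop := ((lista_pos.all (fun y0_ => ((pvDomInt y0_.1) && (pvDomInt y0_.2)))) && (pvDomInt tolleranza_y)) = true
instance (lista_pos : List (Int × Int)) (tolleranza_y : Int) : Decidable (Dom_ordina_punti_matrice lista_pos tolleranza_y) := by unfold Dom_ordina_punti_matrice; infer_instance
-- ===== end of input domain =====

-- B replaces A's point-by-point grouping into nested row lists by index arithmetic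
-- on the (y,x)-sorted list: each row is a contiguous block whose end is found by
-- binary search on y; an alternative algorithm of the same overall cost.


-- ===== PORT A =====
-- riga_corrente is never empty at the riga_corrente[0] access (it is seeded with
-- punti[0] and reset to [p]), so the (0, 0) default is unreachable.
def ordina_punti_matrice (lista_pos : List (Int × Int)) (tolleranza_y : Int) : List (Int × Int) :=
  if lista_pos = [] then []
  else
    let punti := PySem.List.sorted2 lista_pos (fun p => p.2) (fun p => p.1)
    match punti with
    | [] => []   -- unreachable: lista_pos ≠ []
    | p0 :: rest =>
      let st := rest.foldl
        (fun (st : List (List (Int × Int)) × List (Int × Int)) p =>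
          if |p.2 - (st.2.headD (0, 0)).2| ≤ tolleranza_y then
            (st.1, st.2 ++ [p])
          else
            (st.1 ++ [st.2], [p]))
        ([], [p0])
      let righe := st.1 ++ [st.2]
      let righe := righe.map (fun r => PySem.List.sorted r (fun p => p.1))
      righe.foldl (fun acc r => acc ++ r) []

-- ===== PORT B =====
-- inner `while lo < hi` binary search of Source B; all indices are nonnegative in
-- Python, so Nat indices and Nat `/ 2` (= Python `//` on nonnegatives) are exact;
-- punti[mid] is in range (i + 1 <= lo <= mid < hi <= n), so the getD default is
-- unreachable.  `fuel` (hi - lo at the call) only makes the while loop total: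
-- the loop body is unchanged and the guard `lo < hi` is still tested each turn.
def pvBisect (punti : List (Int × Int)) (limite : Int) : Nat → Nat → Nat → Nat
  | 0, lo, _ => lo
  | fuel + 1, lo, hi =>
    if lo < hi then
      let mid := (lo + hi) / 2
      if (punti.getD mid (0, 0)).2 ≤ limite then pvBisect punti limite fuel (mid + 1) hi
      else pvBisect punti limite fuel lo mid
    else lo

-- outer `while i < n` loop of Source B; ordinati is the accumulator `out`; `fuel`
-- (n at the call, i advances by at least 1 per turn) only makes the loop total
def pvLoop (punti : List (Int × Int)) (tol : Int) : Nat → List (Int × Int) → Nat → Nat → List (Int × Int)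
  | 0, out, _, _ => out
  | fuel + 1, out, i, n =>
    if i < n then
      let limite := (punti.getD i (0, 0)).2 + tol
      let r := pvBisect punti limite (n - (i + 1)) (i + 1) n
      pvLoop punti tol fuel
        (out ++ PySem.List.sorted (PySem.List.slice punti (some (i : Int)) (some (r : Int))) (fun p => p.1))
        r n
    else out

def ordina_punti_matrice_alt (lista_pos : List (Int × Int)) (tolleranza_y : Int) : List (Int × Int) :=
  let punti := PySem.List.sorted2 lista_pos (fun p => p.2) (fun p => p.1)
  pvLoop punti tolleranza_y punti.length [] 0 punti.length

-- ===== PRECONDITION & SPEC =====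
def Spec_ordina_punti_matrice (lista_pos : List (Int × Int)) (tolleranza_y : Int) (out : List (Int × Int)) : Prop := out = ordina_punti_matrice_alt lista_pos tolleranza_y
instance (lista_pos : List (Int × Int)) (tolleranza_y : Int) (out : List (Int × Int)) : Decidable (Spec_ordina_punti_matrice lista_pos tolleranza_y out) := by unfold Spec_ordina_punti_matrice; infer_instance

-- ===== CLAIM (what is proved, stated in full; the proofs are below) =====
def Claim_equal_ordina_punti_matrice : Prop := ∀ (lista_pos : List (Int × Int)) (tolleranza_y : Int), Dom_ordina_punti_matrice lista_pos tolleranza_y → Spec_ordina_punti_matrice lista_pos tolleranza_y (ordina_punti_matrice lista_pos tolleranza_y)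

-- ===== LEMMAS AND PROOFS =====

-- Grouping of A, recursion on the remaining points: `first` is the first point
-- of the current row, `cur` the current row so far.
def pvRows (tol : Int) (first : Int × Int) (cur : List (Int × Int)) :
    List (Int × Int) → List (List (Int × Int))
  | [] => [cur]
  | p :: t =>
    if |p.2 - first.2| ≤ tol then pvRows tol first (cur ++ [p]) t
    else cur :: pvRows tol p [p] t

theorem pvRows_foldA (tol : Int) (l : List (Int × Int)) :
    ∀ (righe : List (List (Int × Int))) (first : Int × Int) (cur : List (Int × Int)),
    (let st := l.foldl
        (fun (st : List (List (Int × Int)) × List (Int × Int)) p =>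
          if |p.2 - (st.2.headD (0, 0)).2| ≤ tol then (st.1, st.2 ++ [p])
          else (st.1 ++ [st.2], [p])) (righe, first :: cur)
     st.1 ++ [st.2]) = righe ++ pvRows tol first (first :: cur) l := by
  induction l with
  | nil => intro righe first cur; simp [pvRows]
  | cons p t ih =>
    intro righe first cur
    simp only [List.foldl_cons, List.headD_cons, pvRows]
    by_cases h : |p.2 - first.2| ≤ tol
    · simp only [h, if_pos]
      have := ih righe first (cur ++ [p])
      simpa using this
    · simp only [h, if_neg, not_false_iff]
      have := ih (righe ++ [first :: cur]) p []
      simp only [List.append_assoc, List.singleton_append] at this ⊢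
      simpa using this

theorem foldl_append_flatten {α : Type} (L : List (List α)) :
    ∀ acc : List α, List.foldl (fun a r => a ++ r) acc L = acc ++ L.flatten := by
  induction L with
  | nil => intro acc; simp
  | cons r t ih => intro acc; simp [ih]

-- insertion with a comparator compatible with the key order preserves Pairwise
theorem pairwise_insertBy {α : Type} (before : α → α → Bool) (f : α → Int)
    (h1 : ∀ a b, before a b = true → f a ≤ f b)
    (h2 : ∀ a b, before a b = false → f b ≤ f a)
    (x : α) : ∀ l : List α, l.Pairwise (fun a b => f a ≤ f b) →
    (PySem.List.insertBy before x l).Pairwise (fun a b => f a ≤ f b) := by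
  intro l
  induction l with
  | nil => intro _; simp [PySem.List.insertBy]
  | cons y t ih =>
    intro hl
    rw [List.pairwise_cons] at hl
    simp only [PySem.List.insertBy]
    by_cases hb : before x y = true
    · simp only [hb, if_pos]
      refine List.pairwise_cons.mpr ⟨?_, List.pairwise_cons.mpr hl⟩
      intro z hz
      rcases List.mem_cons.mp hz with rfl | hz'
      · exact h1 x z hb
      · exact le_trans (h1 x y hb) (hl.1 z hz')
    · simp only [hb, if_neg, not_false_iff, Bool.false_eq_true]
      refine List.pairwise_cons.mpr ⟨?_, ih hl.2⟩
      intro z hz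
      rcases (PySem.List.mem_insertBy _ _ _ _).mp hz with hzx | hz'
      · subst hzx; exact h2 _ y (Bool.eq_false_iff.mpr hb)
      · exact hl.1 z hz'

-- the rough (y, x) sort of both ports yields nondecreasing y's
theorem pv_sorted2_pairwise (xs : List (Int × Int)) :
    (PySem.List.sorted2 xs (fun p => p.2) (fun p => p.1)).Pairwise
      (fun a b => a.2 ≤ b.2) := by
  show (List.foldl _ [] xs).Pairwise _
  have key : ∀ (l acc : List (Int × Int)), acc.Pairwise (fun a b : Int × Int => a.2 ≤ b.2) →
      (List.foldl (fun acc x => PySem.List.insertBy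
        (fun a b : Int × Int => decide (a.2 < b.2) || (!decide (b.2 < a.2) && decide (a.1 < b.1)))
        x acc) acc l).Pairwise (fun a b => a.2 ≤ b.2) := by
    intro l
    induction l with
    | nil => intro acc h; simpa using h
    | cons x t ih =>
      intro acc h
      simp only [List.foldl_cons]
      refine ih _ ?_
      refine pairwise_insertBy _ (fun p => p.2) ?_ ?_ x acc h
      · intro a b hab
        simp only [Bool.or_eq_true, decide_eq_true_eq, Bool.and_eq_true,
          Bool.not_eq_true', decide_eq_false_iff_not] at hab
        show a.2 ≤ b.2
        rcases hab with h' | ⟨h', _⟩ <;> omega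
      · intro a b hab
        simp only [Bool.or_eq_false_iff, decide_eq_false_iff_not,
          Bool.and_eq_false_iff, Bool.not_eq_false', decide_eq_true_eq] at hab
        show b.2 ≤ a.2
        rcases hab with ⟨h', _⟩
        omega
  exact key xs [] (by simp)

-- B's view of the grouping: each row is the contiguous block of points whose y
-- stays within tol of the block's first point.
def pvSpanRows (tol : Int) : List (Int × Int) → List (List (Int × Int))
  | [] => []
  | p :: t =>
    (p :: t.takeWhile (fun q => decide (q.2 ≤ p.2 + tol))) ::
      pvSpanRows tol (t.dropWhile (fun q => decide (q.2 ≤ p.2 + tol)))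
termination_by l => l.length
decreasing_by
  have := List.length_dropWhile_le (fun q : Int × Int => decide (q.2 ≤ p.2 + tol)) t
  simp only [List.length_cons]
  omega

-- on a y-sorted tail, A's grouping coincides with the contiguous-block view
theorem pvRows_eq_spanRows (tol : Int) :
    ∀ (l : List (Int × Int)) (first : Int × Int) (cur : List (Int × Int)),
    (∀ q ∈ l, first.2 ≤ q.2) → l.Pairwise (fun a b => a.2 ≤ b.2) →
    pvRows tol first cur l
      = (cur ++ l.takeWhile (fun q => decide (q.2 ≤ first.2 + tol))) ::
          pvSpanRows tol (l.dropWhile (fun q => decide (q.2 ≤ first.2 + tol))) := by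
  intro l
  induction l with
  | nil => intro first cur _ _; simp [pvRows, pvSpanRows]
  | cons p t ih =>
    intro first cur hge hp
    have hyp : first.2 ≤ p.2 := hge p List.mem_cons_self
    have habs : |p.2 - first.2| = p.2 - first.2 := abs_of_nonneg (by omega)
    rw [List.pairwise_cons] at hp
    simp only [pvRows, List.takeWhile_cons, List.dropWhile_cons]
    by_cases h : p.2 ≤ first.2 + tol
    · have h' : |p.2 - first.2| ≤ tol := by omega
      simp only [h, h', if_pos, decide_true]
      have := ih first (cur ++ [p]) (fun q hq => hge q (List.mem_cons_of_mem p hq)) hp.2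
      simp only [List.append_assoc, List.singleton_append] at this
      exact this
    · have h' : ¬ |p.2 - first.2| ≤ tol := by omega
      simp only [h, h', if_neg, not_false_iff, decide_false, Bool.false_eq_true]
      rw [ih p [p] hp.1 hp.2]
      simp [pvSpanRows]

-- binary-search specification: with the predicate antitone along the list,
-- pvBisect returns the boundary between true and false
theorem pvBisect_spec (punti : List (Int × Int)) (limite : Int)
    (H : ∀ j k : Nat, j ≤ k → k < punti.length →
      (punti.getD k (0, 0)).2 ≤ limite → (punti.getD j (0, 0)).2 ≤ limite) :
    ∀ (d lo hi : Nat), hi - lo ≤ d → lo ≤ hi → hi ≤ punti.length →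
      (lo ≤ pvBisect punti limite d lo hi ∧ pvBisect punti limite d lo hi ≤ hi)
      ∧ (∀ j, lo ≤ j → j < pvBisect punti limite d lo hi → (punti.getD j (0, 0)).2 ≤ limite)
      ∧ (∀ j, pvBisect punti limite d lo hi ≤ j → j < hi → ¬ (punti.getD j (0, 0)).2 ≤ limite) := by
  intro d
  induction d with
  | zero =>
    intro lo hi hd hle hlen
    have : lo = hi := by omega
    subst this
    simp only [pvBisect]
    exact ⟨⟨le_refl _, le_refl _⟩, fun j h1 h2 => absurd h2 (by omega),
      fun j h1 h2 => absurd h2 (by omega)⟩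
  | succ d ihd =>
    intro lo hi hd hle hlen
    simp only [pvBisect]
    by_cases h : lo < hi
    · simp only [h, if_pos]
      by_cases hp : (punti.getD ((lo + hi) / 2) (0, 0)).2 ≤ limite
      · simp only [hp, if_pos]
        obtain ⟨⟨hge, hle'⟩, hT, hF⟩ := ihd ((lo + hi) / 2 + 1) hi (by omega) (by omega) hlen
        refine ⟨⟨by omega, hle'⟩, ?_, hF⟩
        intro j hj1 hj2
        by_cases hjm : j ≤ (lo + hi) / 2
        · exact H j ((lo + hi) / 2) hjm (by omega) hp
        · exact hT j (by omega) hj2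
      · simp only [hp, if_neg, not_false_iff]
        obtain ⟨⟨hge, hle'⟩, hT, hF⟩ := ihd lo ((lo + hi) / 2) (by omega) (by omega) (by omega)
        refine ⟨⟨hge, by omega⟩, hT, ?_⟩
        intro j hj1 hj2
        by_cases hjm : j < (lo + hi) / 2
        · exact hF j hj1 hjm
        · intro hpj
          exact hp (H ((lo + hi) / 2) j (by omega) (by omega) hpj)
    · simp only [h, if_neg, not_false_iff]
      exact ⟨⟨le_refl _, hle⟩, fun j h1 h2 => absurd h2 (by omega),
        fun j h1 h2 => absurd h2 (by omega)⟩

-- take/drop at the takeWhile boundary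
theorem pv_take_length_takeWhile {α : Type} (p : α → Bool) :
    ∀ l : List α, l.take (l.takeWhile p).length = l.takeWhile p := by
  intro l
  induction l with
  | nil => simp
  | cons a t ih =>
    by_cases ha : p a
    · simp [ha, ih]
    · simp [ha]

theorem pv_drop_length_takeWhile {α : Type} (p : α → Bool) :
    ∀ l : List α, l.drop (l.takeWhile p).length = l.dropWhile p := by
  intro l
  induction l with
  | nil => simp
  | cons a t ih =>
    by_cases ha : p a
    · simp [ha, ih]
    · simp [ha]

-- length of a takeWhile prefix from pointwise information
theorem pv_takeWhile_length {α : Type} (p : α → Bool) :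
    ∀ (l : List α) (m : Nat), m ≤ l.length →
    (∀ (k : Nat) (h : k < l.length), k < m → p l[k] = true) →
    (∀ (h : m < l.length), ¬ p l[m] = true) →
    (l.takeWhile p).length = m := by
  intro l
  induction l with
  | nil => intro m hm _ _; simp at hm ⊢; omega
  | cons a t ih =>
    intro m hm hT hF
    cases m with
    | zero =>
      have := hF (by simp)
      simp at this
      simp [this]
    | succ m =>
      have ha : p a = true := hT 0 (by simp) (by omega)
      simp only [List.takeWhile_cons, ha, if_pos, List.length_cons]
      rw [ih m (by simpa using hm)
        (fun k hk hkm => hT (k + 1) (by simpa using hk) (by omega))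
        (fun hm' => hF (by simpa using hm'))]

-- the outer loop of B emits exactly the x-sorted contiguous blocks
theorem pvLoop_eq (punti : List (Int × Int)) (tol : Int)
    (hp : punti.Pairwise (fun a b => a.2 ≤ b.2)) :
    ∀ (fuel i : Nat) (out : List (Int × Int)), punti.length - i ≤ fuel → i ≤ punti.length →
    pvLoop punti tol fuel out i punti.length
      = out ++ ((pvSpanRows tol (punti.drop i)).map
          (fun r => PySem.List.sorted r (fun p => p.1))).flatten := by
  have Hmono : ∀ j k : Nat, j ≤ k → k < punti.length →
      (punti.getD j (0, 0)).2 ≤ (punti.getD k (0, 0)).2 := by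
    intro j k hjk hk
    rcases Nat.eq_or_lt_of_le hjk with rfl | hlt
    · exact le_refl _
    · have hj : j < punti.length := by omega
      rw [punti.getD_eq_getElem (0, 0) hj, punti.getD_eq_getElem (0, 0) hk]
      exact List.pairwise_iff_getElem.mp hp j k hj hk hlt
  intro fuel
  induction fuel with
  | zero =>
    intro i out hd hi
    have : i = punti.length := by omega
    simp only [pvBisect, pvLoop]
    subst this
    simp [pvSpanRows]
  | succ d ihd =>
    intro i out hd hi
    simp only [pvLoop]
    by_cases h : i < punti.length
    · simp only [h, if_pos]
      set p : Int × Int := punti.getD i (0, 0) with hpdef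
      set limite : Int := p.2 + tol with hlim
      set r : Nat := pvBisect punti limite (punti.length - (i + 1)) (i + 1) punti.length with hr
      have H : ∀ j k : Nat, j ≤ k → k < punti.length →
          (punti.getD k (0, 0)).2 ≤ limite → (punti.getD j (0, 0)).2 ≤ limite :=
        fun j k hjk hk hkle => le_trans (Hmono j k hjk hk) hkle
      obtain ⟨⟨hr1, hr2⟩, hT, hF⟩ :=
        pvBisect_spec punti limite H (punti.length - (i + 1)) (i + 1) punti.length
          (le_refl _) (by omega) (le_refl _)
      rw [← hr] at hr1 hr2 hT hF
      -- drop i punti = p :: t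
      have hpe : punti[i] = p := by rw [hpdef, punti.getD_eq_getElem (0, 0) h]
      have hdropi : punti.drop i = p :: punti.drop (i + 1) := by
        rw [List.drop_eq_getElem_cons h, hpe]
      set t : List (Int × Int) := punti.drop (i + 1) with ht
      set pr : Int × Int → Bool := fun q => decide (q.2 ≤ p.2 + tol) with hpr
      -- length of the takeWhile block is r - (i + 1)
      have htlen : t.length = punti.length - (i + 1) := by rw [ht]; simp
      have htw : (t.takeWhile pr).length = r - (i + 1) := by
        apply pv_takeWhile_length pr t (r - (i + 1)) (by omega)
        · intro k hk hkm
          have hget : t[k] = punti.getD (i + 1 + k) (0, 0) := by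
            rw [punti.getD_eq_getElem (0, 0) (by omega)]
            simp [ht, List.getElem_drop]
          rw [hpr]
          simp only [decide_eq_true_eq]
          rw [hget]
          exact hT (i + 1 + k) (by omega) (by omega)
        · intro hm
          have hget : t[r - (i + 1)] = punti.getD r (0, 0) := by
            rw [punti.getD_eq_getElem (0, 0) (by omega)]
            simp only [ht, List.getElem_drop]
            congr 1
            omega
          rw [hpr]
          simp only [decide_eq_true_eq]
          rw [hget]
          exact hF r (le_refl _) (by omega)
      -- the slice punti[i:r] is the current block
      have hslice : PySem.List.slice punti (some (i : Int)) (some (r : Int))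
          = p :: t.takeWhile pr := by
        rw [PySem.List.slice_natCast, hdropi]
        have : r - i = (r - (i + 1)) + 1 := by omega
        rw [this, List.take_succ_cons]
        congr 1
        rw [← htw]
        exact pv_take_length_takeWhile pr t
      -- the remaining points are the dropWhile suffix
      have hdropr : punti.drop r = t.dropWhile pr := by
        have h1 : punti.drop r = t.drop (r - (i + 1)) := by
          rw [ht, List.drop_drop]
          congr 1
          omega
        rw [h1, ← htw]
        exact pv_drop_length_takeWhile pr t
      rw [ihd r _ (by omega) (by omega), hslice, hdropi]
      have hspan : pvSpanRows tol (p :: t)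
          = (p :: t.takeWhile pr) :: pvSpanRows tol (t.dropWhile pr) := by
        rw [pvSpanRows]
      rw [hspan, hdropr]
      simp
    · simp only [h, if_neg, not_false_iff]
      have : i = punti.length := by omega
      subst this
      simp [pvSpanRows]

-- ===== VERDICT (by name: the statement is the Claim_ definition above) =====
theorem ordina_punti_matrice_spec : Claim_equal_ordina_punti_matrice := by
  intro lista_pos tol _
  unfold Spec_ordina_punti_matrice ordina_punti_matrice ordina_punti_matrice_alt
  by_cases hnil : lista_pos = []
  · subst hnil
    simp [pvLoop, PySem.List.sorted2]
  · simp only [hnil, if_neg, not_false_iff]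
    have hpw := pv_sorted2_pairwise lista_pos
    rcases hs : PySem.List.sorted2 lista_pos (fun p => p.2) (fun p => p.1) with _ | ⟨p0, rest⟩
    · simp [pvLoop]
    · rw [hs] at hpw
      rw [List.pairwise_cons] at hpw
      simp only []
      -- A side: rows produced by the fold
      have hA := pvRows_foldA tol rest [] p0 []
      simp only [List.nil_append] at hA
      rw [hA, foldl_append_flatten, List.nil_append]
      -- A's rows = contiguous blocks
      have hbridge := pvRows_eq_spanRows tol rest p0 [p0] hpw.1 hpw.2
      have hspan0 : pvRows tol p0 [p0] rest = pvSpanRows tol (p0 :: rest) := by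
        rw [hbridge, pvSpanRows]
        simp
      rw [hspan0]
      -- B side
      rw [pvLoop_eq (p0 :: rest) tol (List.pairwise_cons.mpr hpw) (p0 :: rest).length 0 []
        (by omega) (by omega)]
      simp
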